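-- pv_equiv track=rewrite | github.com/NEKOparapa/AiNiee | ModuleFolders/ResponseExtractor/ResponseExtractor.py | generate_text_by_newlines
-- ===== SOURCE A (Python) =====
-- def generate_text_by_newlines(newline_counts_dict, translation_text_dict):
--     """
--     根据换行符统计字典和源文本字典生成新的字典，并处理多余内容。
--
--     Args:
--         newline_counts_dict: 换行符统计字典，键为字符串序号，值为换行符数量。
--         translation_text_dict: 源文本字典，键为字符串序号，值为文本内容。
--
--     Returns:
--         一个新的字典，键与 newline_counts_dict 相同，值为根据换行符数量从 translation_text_dict
--         中提取并拼接的文本内容。如果 translation_text_dict 内容不足，对应值为空字符串。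
--         如果 translation_text_dict 有剩余内容，将添加新键值对，键为最大原键加1，值为剩余内容按换行拼接。
--     """
--     result_dict = {}
--     translation_keys_sorted = sorted(translation_text_dict.keys(), key=int)
--     translation_index = 0
--
--     # 处理每个预定键的行数需求
--     for key, newline_count in newline_counts_dict.items():
--         extracted_lines = []
--         num_lines_to_extract = newline_count + 1 if newline_count > 0 else 1
--
--         for _ in range(num_lines_to_extract):
--             if translation_index < len(translation_keys_sorted):
--                 current_key = translation_keys_sorted[translation_index]
--                 extracted_lines.append(translation_text_dict[current_key])
--                 translation_index += 1
--             else: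
--                 break
--
--         if extracted_lines:
--             result_dict[key] = '\n'.join(extracted_lines) if newline_count > 0 else extracted_lines[0]
--         else:
--             result_dict[key] = ''
--
--     # 添加剩余内容为新键值对
--     if translation_index < len(translation_keys_sorted):
--         if newline_counts_dict:
--             max_key = max(map(int, newline_counts_dict.keys()))
--         else:
--             max_key = 0
--         new_key = str(max_key + 1)
--         remaining_texts = [translation_text_dict[k] for k in translation_keys_sorted[translation_index:]]
--         result_dict[new_key] = '\n'.join(remaining_texts)
--
--     return result_dict
-- ===== SOURCE B (Python) =====
-- def generate_text_by_newlines(newline_counts_dict, translation_text_dict):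
--     # Streaming state machine: iterate over the sorted LINES once, filling the
--     # current key's buffer and finalizing each key the moment it is full.
--     lines = [translation_text_dict[k] for k in sorted(translation_text_dict, key=int)]
--     pending = list(newline_counts_dict.items())
--     result = {}
--     cur = []
--     for line in lines:
--         cur.append(line)
--         if pending:
--             key, nc = pending[0]
--             cap = nc + 1 if nc > 0 else 1
--             if len(cur) == cap:
--                 result[key] = '\n'.join(cur) if nc > 0 else cur[0]
--                 pending = pending[1:]
--                 cur = []
--     if pending:
--         key, nc = pending[0]
--         if cur:
--             result[key] = '\n'.join(cur) if nc > 0 else cur[0]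
--         else:
--             result[key] = ''
--         for key, _nc in pending[1:]:
--             result[key] = ''
--     elif cur:
--         max_key = max(map(int, newline_counts_dict)) if newline_counts_dict else 0
--         result[str(max_key + 1)] = '\n'.join(cur)
--     return result
-- ===== Notes on version B (the rewrite author's own statement) =====
-- stated objective: alternative
-- what changed: B inverts the loop nesting: instead of A's per-key inner loop pulling lines by index, B streams the sorted lines once through a state machine (current buffer + pending key queue), finalizing each key the moment its buffer reaches its capacity, then settles the leftover pending keys or leftover lines.
-- outside the precondition, e.g. on generate_text_by_newlines({}, {'x': 'a'}): A raises ValueError, B raises ValueError; on generate_text_by_newlines({'y': 0}, {'1': 'a', '2': 'b'}): A raises ValueError, B raises ValueError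
import Mathlib
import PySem

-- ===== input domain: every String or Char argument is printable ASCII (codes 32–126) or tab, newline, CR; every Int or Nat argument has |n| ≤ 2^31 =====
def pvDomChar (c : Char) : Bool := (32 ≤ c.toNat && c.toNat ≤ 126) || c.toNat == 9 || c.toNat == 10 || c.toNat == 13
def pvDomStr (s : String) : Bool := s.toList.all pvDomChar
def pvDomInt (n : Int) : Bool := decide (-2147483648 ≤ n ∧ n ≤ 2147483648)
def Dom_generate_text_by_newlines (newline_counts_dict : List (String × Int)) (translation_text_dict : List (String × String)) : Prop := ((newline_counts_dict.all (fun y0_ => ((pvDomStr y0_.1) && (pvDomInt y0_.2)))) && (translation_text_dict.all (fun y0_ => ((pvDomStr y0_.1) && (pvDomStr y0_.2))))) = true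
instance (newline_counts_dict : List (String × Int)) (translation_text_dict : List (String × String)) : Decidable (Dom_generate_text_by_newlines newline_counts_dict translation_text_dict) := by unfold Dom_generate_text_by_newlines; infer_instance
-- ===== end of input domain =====

-- B replaces A's per-key inner extraction loop by a single streaming pass over the
-- sorted lines that finalizes each key the moment its buffer is full (objective: alternative).

-- ===== PORT A =====
-- inner loop: 'for _ in range(num_lines_to_extract): if translation_index < len: append; advance else break'
def genA_extract (t : PySem.Dict String String) (skeys : List String) : Int → Nat → (List String × Int)
  | idx, 0 => ([], idx)
  | idx, n+1 =>
    if idx < (skeys.length : Int) then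
      let ck := (PySem.List.pyGet? skeys idx).getD ""
      let line := t.getD ck ""          -- translation_text_dict[current_key]; key always present
      let r := genA_extract t skeys (idx+1) n
      (line :: r.1, r.2)
    else ([], idx)

-- outer loop over newline_counts_dict.items(), carrying (result_dict, translation_index)
def genA_go (t : PySem.Dict String String) (skeys : List String) :
    List (String × Int) → PySem.Dict String String → Int → PySem.Dict String String × Int
  | [], res, idx => (res, idx)
  | (key, nc) :: rest, res, idx =>
    let n : Int := if nc > 0 then nc + 1 else 1
    let r := genA_extract t skeys idx n.toNat
    let v : String := match r.1 with
      | [] => ""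
      | l0 :: _ => if nc > 0 then PySem.Str.join "\n" r.1 else l0
    genA_go t skeys rest (res.insert key v) r.2

def generate_text_by_newlines (newline_counts_dict : List (String × Int)) (translation_text_dict : List (String × String)) : List (String × String) :=
  let t := PySem.Dict.mk translation_text_dict
  let skeys := PySem.List.sorted t.keys (fun k => (PySem.Int.ofStr? k).getD 0)   -- sorted(keys, key=int); int() never fails under Pre_
  let items := (PySem.Dict.mk newline_counts_dict).items                          -- newline_counts_dict.items()
  let r := genA_go t skeys items PySem.Dict.empty 0
  if r.2 < (skeys.length : Int) then
    let max_key : Int :=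
      if items = [] then 0
      else (PySem.List.max? (items.map (fun p => (PySem.Int.ofStr? p.1).getD 0)) (fun x => x)).getD 0
    let remaining := (PySem.List.slice skeys (some r.2) none).map (fun k => t.getD k "")
    (r.1.insert (PySem.Int.toStr (max_key + 1)) (PySem.Str.join "\n" remaining)).items
  else r.1.items

-- ===== PORT B =====
-- 'for line in lines:' — stream each line into cur, finalizing the head pending key when full
def genB_go : List String → List (String × Int) → List String → PySem.Dict String String →
    (PySem.Dict String String × List (String × Int) × List String)
  | [], pending, cur, res => (res, pending, cur)
  | line :: rest, pending, cur, res =>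
    let cur' := cur ++ [line]
    match pending with
    | [] => genB_go rest [] cur' res
    | (key, nc) :: prest =>
      let cap : Int := if nc > 0 then nc + 1 else 1
      if (cur'.length : Int) = cap then
        genB_go rest prest []
          (res.insert key (if nc > 0 then PySem.Str.join "\n" cur' else cur'.headD ""))
      else genB_go rest ((key, nc) :: prest) cur' res

def generate_text_by_newlines_alt (newline_counts_dict : List (String × Int)) (translation_text_dict : List (String × String)) : List (String × String) :=
  let t := PySem.Dict.mk translation_text_dict
  let lines := (PySem.List.sorted t.keys (fun k => (PySem.Int.ofStr? k).getD 0)).map (fun k => t.getD k "")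
  let pending0 := (PySem.Dict.mk newline_counts_dict).items
  let r := genB_go lines pending0 [] PySem.Dict.empty
  match r.2.1 with
  | (key, nc) :: prest =>
    -- 'if pending:' — settle the first pending key from cur, the rest get ''
    let res1 := if r.2.2 ≠ [] then
        r.1.insert key (if nc > 0 then PySem.Str.join "\n" r.2.2 else r.2.2.headD "")
      else r.1.insert key ""
    (prest.foldl (fun d p => d.insert p.1 "") res1).items
  | [] =>
    if r.2.2 ≠ [] then
      -- 'elif cur:' — leftover lines go under str(max_key + 1)
      let max_key : Int :=
        if pending0 = [] then 0
        else (PySem.List.max? (pending0.map (fun p => (PySem.Int.ofStr? p.1).getD 0)) (fun x => x)).getD 0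
      (r.1.insert (PySem.Int.toStr (max_key + 1)) (PySem.Str.join "\n" r.2.2)).items
    else r.1.items

-- ===== PRECONDITION & SPEC =====
-- Pre_ excludes exactly the inputs where Python A raises ValueError: a translation key
-- that int() cannot parse, or — when the distinct translation keys outnumber the total
-- capacity of the newline-count entries, so max(map(int, keys)) runs — a newline_counts
-- key that int() cannot parse.
def Pre_generate_text_by_newlines (newline_counts_dict : List (String × Int)) (translation_text_dict : List (String × String)) : Prop :=
  (∀ p ∈ translation_text_dict, (PySem.Int.ofStr? p.1).isSome = true) ∧
  ((((PySem.Dict.mk newline_counts_dict).items.map (fun p => if p.2 > 0 then p.2 + 1 else 1)).sum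
      < ((PySem.Dict.mk translation_text_dict).items.length : Int)) →
    ∀ p ∈ newline_counts_dict, (PySem.Int.ofStr? p.1).isSome = true)
instance (newline_counts_dict : List (String × Int)) (translation_text_dict : List (String × String)) : Decidable (Pre_generate_text_by_newlines newline_counts_dict translation_text_dict) := by unfold Pre_generate_text_by_newlines; infer_instance

def pvWitness_generate_text_by_newlines : (List (String × Int)) × (List (String × String)) :=
  ([("1", 1), ("2", 0)], [("1", "a"), ("2", "b"), ("3", "c"), ("4", "d")])

def Spec_generate_text_by_newlines (newline_counts_dict : List (String × Int)) (translation_text_dict : List (String × String)) (out : List (String × String)) : Prop := out = generate_text_by_newlines_alt newline_counts_dict translation_text_dict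
instance (newline_counts_dict : List (String × Int)) (translation_text_dict : List (String × String)) (out : List (String × String)) : Decidable (Spec_generate_text_by_newlines newline_counts_dict translation_text_dict out) := by unfold Spec_generate_text_by_newlines; infer_instance

-- ===== CLAIM (what is proved, stated in full; the proofs are below) =====
def Claim_equal_generate_text_by_newlines : Prop := ∀ (newline_counts_dict : List (String × Int)) (translation_text_dict : List (String × String)), Dom_generate_text_by_newlines newline_counts_dict translation_text_dict → Pre_generate_text_by_newlines newline_counts_dict translation_text_dict → Spec_generate_text_by_newlines newline_counts_dict translation_text_dict (generate_text_by_newlines newline_counts_dict translation_text_dict)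

-- ===== LEMMAS AND PROOFS =====

-- common chunking spec: capacity of a key, formatting of its collected lines
def capN (nc : Int) : Nat := (if nc > 0 then nc + 1 else 1).toNat

def fmt (nc : Int) : List String → String
  | [] => ""
  | c0 :: rest => if nc > 0 then PySem.Str.join "\n" (c0 :: rest) else c0

-- reference machine both ports are reduced to
def Sgo : List (String × Int) → List String → List String → PySem.Dict String String →
    (PySem.Dict String String × List (String × Int) × List String)
  | [], lines, cur, res => (res, [], cur ++ lines)
  | (k, nc) :: ps, lines, cur, res =>
    if lines.length < capN nc - cur.length then (res, (k, nc) :: ps, cur ++ lines)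
    else Sgo ps (lines.drop (capN nc - cur.length)) []
          (res.insert k (fmt nc (cur ++ lines.take (capN nc - cur.length))))

theorem capN_pos (nc : Int) : 0 < capN nc := by unfold capN; split <;> omega

theorem capN_int (nc : Int) : (capN nc : Int) = if nc > 0 then nc + 1 else 1 := by
  unfold capN; split <;> omega

theorem fmt_ne_nil (nc : Int) (ls : List String) (h : ls ≠ []) :
    fmt nc ls = if nc > 0 then PySem.Str.join "\n" ls else ls.headD "" := by
  cases ls with
  | nil => exact absurd rfl h
  | cons a l => rfl

theorem genB_eq_Sgo : ∀ (lines : List String) (pending : List (String × Int)) (cur : List String)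
    (res : PySem.Dict String String),
    (∀ k nc ps, pending = (k, nc) :: ps → cur.length < capN nc) →
    genB_go lines pending cur res = Sgo pending lines cur res := by
  intro lines
  induction lines with
  | nil =>
    intro pending cur res hinv
    match pending with
    | [] => simp [genB_go, Sgo]
    | (k, nc) :: ps =>
      have hc := hinv k nc ps rfl
      rw [genB_go, Sgo, if_pos (by simpa using by omega : [].length < capN nc - cur.length)]
      simp
  | cons line rest ih =>
    intro pending cur res hinv
    match pending with
    | [] =>
      rw [genB_go]
      rw [ih [] (cur ++ [line]) res (by intro k nc ps h; exact absurd h (by simp))]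
      simp [Sgo]
    | (k, nc) :: ps =>
      have hc := hinv k nc ps rfl
      have hcap := capN_int nc
      rw [genB_go]
      by_cases he : ((cur ++ [line]).length : Int) = (if nc > 0 then nc + 1 else 1)
      · rw [if_pos he]
        have hlen : cur.length + 1 = capN nc := by
          have h2 : ((cur ++ [line]).length : Int) = (capN nc : Int) := by rw [hcap]; exact he
          simp only [List.length_append, List.length_cons, List.length_nil] at h2
          omega
        rw [ih ps [] _ (by intro k' nc' ps' h; simpa using capN_pos nc')]
        have hneed : capN nc - cur.length = 1 := by omega
        conv_rhs => rw [Sgo]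
        have hcond : ¬ ((line :: rest).length < capN nc - cur.length) := by
          have hl : (line :: rest).length = rest.length + 1 := by simp
          omega
        rw [if_neg hcond, hneed]
        rw [show (line :: rest).drop 1 = rest from rfl]
        rw [fmt_ne_nil nc (cur ++ (line :: rest).take 1) (by simp)]
        rw [show (line :: rest).take 1 = [line] from rfl]
      · rw [if_neg he]
        have hlt : cur.length + 1 < capN nc := by
          have hne : ((cur ++ [line]).length : Int) ≠ (capN nc : Int) := by rw [hcap]; exact he
          have : cur.length + 1 ≠ capN nc := by
            intro h; exact hne (by simp [← h])
          omega
        rw [ih ((k, nc) :: ps) (cur ++ [line]) res (by intro k' nc' ps' h; cases h; simpa using hlt)]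
        -- unfold one step of Sgo on both sides and match
        obtain ⟨m, hm⟩ : ∃ m, capN nc - cur.length = m + 2 := ⟨capN nc - cur.length - 2, by omega⟩
        have hm' : capN nc - (cur ++ [line]).length = m + 1 := by simp; omega
        conv_lhs => rw [Sgo]
        conv_rhs => rw [Sgo]
        rw [hm, hm']
        by_cases hstop : rest.length < m + 1
        · rw [if_pos (by simpa using by omega : (line :: rest).length < m + 2),
              if_pos hstop]
          simp
        · rw [if_neg (by simpa using by omega : ¬ (line :: rest).length < m + 2),
              if_neg hstop]
          rw [show (line :: rest).drop (m + 2) = rest.drop (m + 1) from rfl,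
              show (line :: rest).take (m + 2) = line :: rest.take (m + 1) from rfl]
          simp

-- A's loop equals the reference machine (plus settlement of exhausted pending keys)
def finishS (s : PySem.Dict String String × List (String × Int) × List String) :
    PySem.Dict String String :=
  match s.2.1 with
  | [] => s.1
  | (k, nc) :: ps => ps.foldl (fun d p => d.insert p.1 "") (s.1.insert k (fmt nc s.2.2))

theorem genA_extract_eq (t : PySem.Dict String String) (skeys : List String) (n : Nat) :
    ∀ idx : Int, 0 ≤ idx → idx ≤ (skeys.length : Int) →
    genA_extract t skeys idx n =
      (((skeys.map (fun k => t.getD k "")).drop idx.toNat).take n, min (idx + n) (skeys.length : Int)) := by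
  induction n with
  | zero =>
    intro idx h0 hle
    simp only [genA_extract, List.take_zero]
    exact Prod.ext rfl (by omega)
  | succ n ih =>
    intro idx h0 hle
    rw [genA_extract]
    by_cases h : idx < (skeys.length : Int)
    · rw [if_pos h]
      have hn : idx.toNat < skeys.length := by omega
      have hck : (PySem.List.pyGet? skeys idx).getD "" = skeys[idx.toNat] := by
        rw [PySem.List.pyGet?_of_nonneg skeys h0, List.getElem?_eq_getElem hn]; rfl
      rw [ih (idx + 1) (by omega) (by omega)]
      have hdrop : (skeys.map (fun k => t.getD k "")).drop idx.toNat
          = t.getD skeys[idx.toNat] "" :: (skeys.map (fun k => t.getD k "")).drop (idx.toNat + 1) := by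
        rw [List.drop_eq_getElem_cons (by simpa using hn)]
        simp [List.getElem_map]
      simp only [hck, hdrop]
      refine Prod.ext ?_ ?_
      · simp only [List.take_succ_cons]
        have h1 : (idx + 1).toNat = idx.toNat + 1 := by omega
        rw [h1]
      · simp only []
        push_cast
        omega
    · rw [if_neg h]
      refine Prod.ext ?_ ?_
      · simp only []
        rw [List.drop_eq_nil_of_le (by simp; omega), List.take_nil]
      · simp only []
        push_cast
        omega

theorem genA_go_exhausted (t : PySem.Dict String String) (skeys : List String) :
    ∀ (ps : List (String × Int)) (res : PySem.Dict String String),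
    genA_go t skeys ps res (skeys.length : Int) =
      (ps.foldl (fun d p => d.insert p.1 "") res, (skeys.length : Int)) := by
  intro ps
  induction ps with
  | nil => intro res; simp [genA_go]
  | cons p rest ih =>
    intro res
    obtain ⟨k, nc⟩ := p
    rw [genA_go]
    rw [genA_extract_eq t skeys _ _ (by positivity) le_rfl]
    have hdrop : ((skeys.map fun k => t.getD k "").drop ((skeys.length : Int)).toNat) = [] :=
      List.drop_eq_nil_of_le (by simp)
    rw [hdrop, List.take_nil]
    have hmin : min ((skeys.length : Int) + (((if nc > 0 then nc + 1 else 1 : Int)).toNat : Int))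
        (skeys.length : Int) = (skeys.length : Int) := by omega
    rw [hmin]
    simpa using ih (res.insert k "")

theorem fmt_match (nc : Int) (ls : List String) :
    (match ls with
     | [] => ""
     | l0 :: _ => if nc > 0 then PySem.Str.join "\n" ls else l0) = fmt nc ls := by
  cases ls <;> rfl

theorem genA_eq_Sgo (t : PySem.Dict String String) (skeys : List String) :
    ∀ (pending : List (String × Int)) (res : PySem.Dict String String) (idx : Int),
    0 ≤ idx → idx ≤ (skeys.length : Int) →
    genA_go t skeys pending res idx =
      (finishS (Sgo pending ((skeys.map (fun k => t.getD k "")).drop idx.toNat) [] res),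
       match (Sgo pending ((skeys.map (fun k => t.getD k "")).drop idx.toNat) [] res).2.1 with
       | [] => (skeys.length : Int) -
           ((Sgo pending ((skeys.map (fun k => t.getD k "")).drop idx.toNat) [] res).2.2.length : Int)
       | _ :: _ => (skeys.length : Int)) := by
  intro pending
  induction pending with
  | nil =>
    intro res idx h0 hle
    rw [genA_go, Sgo]
    refine Prod.ext rfl ?_
    simp only [List.nil_append]
    show idx = (skeys.length : Int) - (((skeys.map fun k => t.getD k "").drop idx.toNat).length : Int)
    simp only [List.length_drop, List.length_map]
    omega
  | cons p ps ih =>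
    intro res idx h0 hle
    obtain ⟨k, nc⟩ := p
    rw [genA_go]
    rw [genA_extract_eq t skeys _ idx h0 hle]
    have hcN : ((if nc > 0 then nc + 1 else 1 : Int)).toNat = capN nc := rfl
    rw [hcN]
    have hcapc : (((capN nc : Nat) : Int)) = (capN nc : Int) := rfl
    have hL : ((skeys.map fun k => t.getD k "").drop idx.toNat).length
        = skeys.length - idx.toNat := by simp
    by_cases hen : ((skeys.map fun k => t.getD k "").drop idx.toNat).length < capN nc
    · -- not enough lines: everything is consumed, remaining keys settle to ''
      have htake : ((skeys.map fun k => t.getD k "").drop idx.toNat).take (capN nc)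
          = (skeys.map fun k => t.getD k "").drop idx.toNat :=
        List.take_of_length_le (by omega)
      have hmin : min (idx + ((capN nc : Nat) : Int))
          (skeys.length : Int) = (skeys.length : Int) := by omega
      rw [htake, hmin]
      conv_rhs => rw [Sgo]
      have hcond : ((skeys.map fun k => t.getD k "").drop idx.toNat).length
          < capN nc - ([] : List String).length := by simpa using hen
      rw [if_pos hcond]
      rw [fmt_match]
      rw [genA_go_exhausted]
      unfold finishS
      simp
    · -- enough lines: this key takes a full chunk and we recurse
      have hmin : min (idx + ((capN nc : Nat) : Int))
          (skeys.length : Int) = idx + (capN nc : Int) := by omega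
      rw [hmin, fmt_match]
      have hdd : (skeys.map fun k => t.getD k "").drop (idx + (capN nc : Int)).toNat
          = ((skeys.map fun k => t.getD k "").drop idx.toNat).drop (capN nc) := by
        rw [List.drop_drop]
        congr 1
        omega
      have hrec := ih (res.insert k (fmt nc (((skeys.map fun k => t.getD k "").drop idx.toNat).take
            (capN nc)))) (idx + (capN nc : Int))
            (by have := capN_pos nc; omega) (by omega)
      rw [hdd] at hrec
      rw [hrec]
      conv_rhs => rw [Sgo]
      have hcond : ¬ (((skeys.map fun k => t.getD k "").drop idx.toNat).length
          < capN nc - ([] : List String).length) := by simpa using hen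
      rw [if_neg hcond]
      simp only [Nat.sub_zero, List.length_nil, List.nil_append]

-- when Sgo ends with no pending keys, its third component is a suffix of the lines
theorem Sgo_suffix : ∀ (pending : List (String × Int)) (lines : List String)
    (res : PySem.Dict String String),
    (Sgo pending lines [] res).2.1 = [] →
    (Sgo pending lines [] res).2.2.length ≤ lines.length ∧
    (Sgo pending lines [] res).2.2 = lines.drop (lines.length - (Sgo pending lines [] res).2.2.length) := by
  intro pending
  induction pending with
  | nil => intro lines res h; simp [Sgo]
  | cons p ps ih =>
    intro lines res h
    obtain ⟨k, nc⟩ := p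
    rw [Sgo] at h ⊢
    by_cases hcond : lines.length < capN nc - ([] : List String).length
    · rw [if_pos hcond] at h; exact absurd h (by simp)
    · rw [if_neg hcond] at h ⊢
      simp only [List.length_nil, Nat.sub_zero] at hcond h ⊢
      obtain ⟨h1, h2⟩ := ih (lines.drop (capN nc)) _ h
      refine ⟨by simp at h1 ⊢; omega, ?_⟩
      rw [h2, List.drop_drop]
      congr 1
      simp only [List.length_drop] at h1 ⊢
      omega

-- ===== VERDICT (by name: the statement is the Claim_ definition above) =====
theorem generate_text_by_newlines_spec : Claim_equal_generate_text_by_newlines := by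
  intro ncd ttd _ _
  unfold Spec_generate_text_by_newlines generate_text_by_newlines generate_text_by_newlines_alt
  simp only []
  set t := PySem.Dict.mk ttd with ht
  set skeys := PySem.List.sorted t.keys (fun k => (PySem.Int.ofStr? k).getD 0) with hsk
  set texts := skeys.map (fun k => t.getD k "") with htx
  set items := (PySem.Dict.mk ncd).items with hit
  have hlen : texts.length = skeys.length := by rw [htx, List.length_map]
  have hB : genB_go texts items [] PySem.Dict.empty = Sgo items texts [] PySem.Dict.empty :=
    genB_eq_Sgo texts items [] _ (by intro k nc ps h; simpa using capN_pos nc)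
  have hA := genA_eq_Sgo t skeys items PySem.Dict.empty 0 le_rfl (by positivity)
  rw [show ((0 : Int)).toNat = 0 from rfl, List.drop_zero, ← htx] at hA
  rw [hA, hB]
  cases hp : (Sgo items texts [] PySem.Dict.empty).2.1 with
  | cons hd tl =>
    obtain ⟨k, nc⟩ := hd
    dsimp only
    rw [if_neg (lt_irrefl ((skeys.length : Int)))]
    unfold finishS
    rw [hp]
    dsimp only
    by_cases hne : (Sgo items texts [] PySem.Dict.empty).2.2 = []
    · have hcB : ¬ ((Sgo items texts [] PySem.Dict.empty).2.2 ≠ []) := by simp [hne]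
      rw [if_neg hcB, hne]
      rfl
    · have hcB : (Sgo items texts [] PySem.Dict.empty).2.2 ≠ [] := hne
      rw [if_pos hcB, fmt_ne_nil nc _ hne]
  | nil =>
    dsimp only
    obtain ⟨hle2, hdropeq⟩ := Sgo_suffix items texts PySem.Dict.empty hp
    unfold finishS
    rw [hp]
    dsimp only
    by_cases hne : (Sgo items texts [] PySem.Dict.empty).2.2 = []
    · have hcA : ¬ ((skeys.length : Int) - ((Sgo items texts [] PySem.Dict.empty).2.2.length : Int)
          < (skeys.length : Int)) := by rw [hne]; simp
      have hcB : ¬ ((Sgo items texts [] PySem.Dict.empty).2.2 ≠ []) := by simp [hne]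
      rw [if_neg hcA, if_neg hcB]
    · have hpos : 0 < (Sgo items texts [] PySem.Dict.empty).2.2.length :=
        List.length_pos_of_ne_nil hne
      have hcA : (skeys.length : Int) - ((Sgo items texts [] PySem.Dict.empty).2.2.length : Int)
          < (skeys.length : Int) := by
        have h1 : (1 : Int) ≤ ((Sgo items texts [] PySem.Dict.empty).2.2.length : Int) := by
          exact_mod_cast hpos
        omega
      have hcB : (Sgo items texts [] PySem.Dict.empty).2.2 ≠ [] := hne
      rw [if_pos hcA, if_pos hcB]
      have h0 : (0 : Int) ≤ (skeys.length : Int) - ((Sgo items texts [] PySem.Dict.empty).2.2.length : Int) := by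
        rw [hlen] at hle2; omega
      rw [PySem.List.slice_from _ h0]
      have hrem : (skeys.drop ((skeys.length : Int) - ((Sgo items texts [] PySem.Dict.empty).2.2.length : Int)).toNat).map (fun k => t.getD k "")
          = (Sgo items texts [] PySem.Dict.empty).2.2 := by
        rw [List.map_drop, ← htx]
        rw [show ((skeys.length : Int) - ((Sgo items texts [] PySem.Dict.empty).2.2.length : Int)).toNat
            = texts.length - (Sgo items texts [] PySem.Dict.empty).2.2.length by rw [hlen] at hle2 ⊢; omega]
        exact hdropeq.symm
      rw [hrem]
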